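-- pv_equiv track=rewrite | github.com/Shawn9948/algorism-repo | 백준/Silver/1652. 누울 자리를 찾아라/누울 자리를 찾아라.py | cheker
-- ===== SOURCE A (Python) =====
-- def cheker(list):
--     count = 2
--     room = 0
--     for x in list:
--         if (x == "."):
--             count -= 1
--         else:
--             count = 2
--         if (count == 0):
--             room += 1
--     return room
-- ===== SOURCE B (Python) =====
-- def cheker(list):
--     # Build the run structure (maximal runs of equal "is dot" value), then
--     # count the dot-runs of length >= 2.
--     runs = []  # (key, length), most recent run first
--     for x in list:
--         k = (x == ".")
--         if runs and runs[0][0] == k: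
--             runs[0] = (k, runs[0][1] + 1)
--         else:
--             runs.insert(0, (k, 1))
--     return sum(1 for k, n in runs if k and n >= 2)
-- ===== Notes on version B (the rewrite author's own statement) =====
-- stated objective: alternative
-- what changed: B first splits the input into maximal runs of equal is-dot value and then counts the dot-runs of length >= 2, instead of A's running countdown counter that fires when it reaches zero.
import Mathlib
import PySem

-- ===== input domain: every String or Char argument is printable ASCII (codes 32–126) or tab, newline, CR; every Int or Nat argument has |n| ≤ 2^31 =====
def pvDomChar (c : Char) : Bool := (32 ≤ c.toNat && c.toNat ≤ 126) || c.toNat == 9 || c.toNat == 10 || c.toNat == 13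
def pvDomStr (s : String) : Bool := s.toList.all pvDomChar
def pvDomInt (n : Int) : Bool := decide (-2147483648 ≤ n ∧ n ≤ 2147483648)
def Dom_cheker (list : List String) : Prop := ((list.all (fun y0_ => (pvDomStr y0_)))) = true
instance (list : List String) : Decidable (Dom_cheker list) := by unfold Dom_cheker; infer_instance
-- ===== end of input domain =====

-- ===== PORT A =====
-- B changes the algorithm (run structure first, then count qualifying runs); same return value, objective: alternative.
def chekerStep (s : Int × Int) (x : String) : Int × Int :=
  let count := if x = "." then s.1 - 1 else 2
  let room := if count = 0 then s.2 + 1 else s.2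
  (count, room)

def cheker (list : List String) : Int :=
  (list.foldl chekerStep (2, 0)).2

-- ===== PORT B =====
def chekerRunsStep (runs : List (Bool × Int)) (x : String) : List (Bool × Int) :=
  let k : Bool := x == "."
  match runs with
  | (k0, n) :: rest => if k0 = k then (k, n + 1) :: rest else (k, 1) :: (k0, n) :: rest
  | [] => [(k, 1)]

def chekerCount (runs : List (Bool × Int)) : Int :=
  (runs.countP (fun g => g.1 && decide (g.2 ≥ 2)) : Int)

def cheker_alt (list : List String) : Int :=
  chekerCount (list.foldl chekerRunsStep [])

-- ===== PRECONDITION & SPEC =====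
def Spec_cheker (list : List String) (out : Int) : Prop := out = cheker_alt list
instance (list : List String) (out : Int) : Decidable (Spec_cheker list out) := by unfold Spec_cheker; infer_instance

-- ===== CLAIM (what is proved, stated in full; the proofs are below) =====
def Claim_equal_cheker : Prop := ∀ (list : List String), Dom_cheker list → Spec_cheker list (cheker list)

-- ===== LEMMAS AND PROOFS =====
-- relation between A's loop state (count, room) and B's run accumulator
def chekerRel (c r : Int) (runs : List (Bool × Int)) : Prop :=
  match runs with
  | (true, n) :: rest => 1 ≤ n ∧ c = 2 - n ∧ r = chekerCount rest + (if 2 ≤ n then 1 else 0)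
  | _ => c = 2 ∧ r = chekerCount runs

lemma chekerCount_cons (k : Bool) (n : Int) (rest : List (Bool × Int)) :
    chekerCount ((k, n) :: rest) = (if k ∧ 2 ≤ n then 1 else 0) + chekerCount rest := by
  simp only [chekerCount, List.countP_cons]
  by_cases hk : k = true <;> by_cases hn : 2 ≤ n <;> simp [hk, hn] <;> omega

lemma cheker_loop_eq (l : List String) : ∀ (c r : Int) (runs : List (Bool × Int)),
    chekerRel c r runs →
    (l.foldl chekerStep (c, r)).2 = chekerCount (l.foldl chekerRunsStep runs) := by
  induction l with
  | nil =>
    intro c r runs h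
    match runs with
    | (true, n) :: rest =>
      obtain ⟨h1, h2, h3⟩ := h
      simp only [List.foldl_nil]
      rw [chekerCount_cons]
      simp only [h3, true_and]
      omega
    | [] => exact h.2
    | (false, n) :: rest => exact h.2
  | cons x l ih =>
    intro c r runs h
    simp only [List.foldl_cons]
    apply ih
    by_cases hx : x = "."
    · have hk : (x == ".") = true := by simp [hx]
      simp only [if_pos hx]
      change chekerRel (c - 1) (if c - 1 = 0 then r + 1 else r) (chekerRunsStep runs x)
      match runs with
      | (true, n) :: rest =>
        obtain ⟨h1, h2, h3⟩ := h
        have hrun : chekerRunsStep ((true, n) :: rest) x = (true, n + 1) :: rest := by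
          simp [chekerRunsStep, hk]
        rw [hrun]
        refine ⟨by omega, by omega, ?_⟩
        by_cases hn : n = 1
        · have hc : c - 1 = 0 := by omega
          simp only [hc, h3, hn]
          norm_num
        · have hc : ¬ (c - 1 = 0) := by omega
          have h2n : 2 ≤ n := by omega
          have h2n' : 2 ≤ n + 1 := by omega
          simp only [if_neg hc, h3, if_pos h2n, if_pos h2n']
      | [] =>
        obtain ⟨h2, h3⟩ := h
        have hrun : chekerRunsStep [] x = [(true, 1)] := by simp [chekerRunsStep, hk]
        rw [hrun]
        refine ⟨by omega, by omega, ?_⟩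
        have hc : ¬ (c - 1 = 0) := by omega
        simp only [if_neg hc, h3, chekerCount]
        norm_num
      | (false, n) :: rest =>
        obtain ⟨h2, h3⟩ := h
        have hrun : chekerRunsStep ((false, n) :: rest) x = (true, 1) :: (false, n) :: rest := by
          simp [chekerRunsStep, hk]
        rw [hrun]
        refine ⟨by omega, by omega, ?_⟩
        have hc : ¬ (c - 1 = 0) := by omega
        rw [if_neg hc, h3, if_neg (by omega : ¬ (2:Int) ≤ 1)]
        rw [chekerCount_cons]
        omega
    · have hk : (x == ".") = false := by simp [hx]
      simp only [if_neg hx]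
      change chekerRel 2 (if (2:Int) = 0 then r + 1 else r) (chekerRunsStep runs x)
      rw [if_neg (by norm_num : ¬ (2:Int) = 0)]
      match runs with
      | (true, n) :: rest =>
        obtain ⟨h1, h2, h3⟩ := h
        have hrun : chekerRunsStep ((true, n) :: rest) x = (false, 1) :: (true, n) :: rest := by
          simp [chekerRunsStep, hk]
        rw [hrun]
        refine ⟨rfl, ?_⟩
        simp only [chekerCount_cons, h3, true_and]
        split_ifs <;> omega
      | [] =>
        obtain ⟨h2, h3⟩ := h
        have hrun : chekerRunsStep [] x = [(false, 1)] := by simp [chekerRunsStep, hk]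
        rw [hrun]
        refine ⟨rfl, ?_⟩
        simp [chekerCount, h3]
      | (false, n) :: rest =>
        obtain ⟨h2, h3⟩ := h
        have hrun : chekerRunsStep ((false, n) :: rest) x = (false, n + 1) :: rest := by
          simp [chekerRunsStep, hk]
        rw [hrun]
        refine ⟨rfl, ?_⟩
        simp only [chekerCount_cons, h3, Bool.false_eq_true, false_and, if_false]

-- ===== VERDICT (by name: the statement is the Claim_ definition above) =====
theorem cheker_spec : Claim_equal_cheker := by
  intro list _
  unfold Spec_cheker cheker cheker_alt
  exact cheker_loop_eq list 2 0 [] ⟨rfl, rfl⟩
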